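-- pv_equiv track=rewrite | github.com/zadorian/SEARCH_ENGINEER | BACKEND/modules/input_output/matrix/scripts/rebuild_sources_split.py | _select_header_row
-- ===== SOURCE A (Python) =====
-- def _select_header_row(rows: list[list[str]]) -> tuple[list[str], int]:
--     for idx, row in enumerate(rows):
--         if not row:
--             continue
--         normalized = [str(cell or "").strip() for cell in row]
--         lowered = [cell.lower() for cell in normalized]
--         has_url = any("url" in cell or "link" in cell or "domain" in cell for cell in lowered)
--         has_desc = any("description" in cell or cell in ("desc", "notes", "note", "summary", "about") for cell in lowered)
--         if has_url and has_desc: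
--             return normalized, idx
--     for idx, row in enumerate(rows):
--         if not row:
--             continue
--         normalized = [str(cell or "").strip() for cell in row]
--         if sum(1 for cell in normalized if cell) >= 2:
--             return normalized, idx
--     return [], -1
-- ===== SOURCE B (Python) =====
-- def _select_header_row(rows: list[list[str]]) -> tuple[list[str], int]:
--     fallback = None
--     for idx, row in enumerate(rows):
--         if not row:
--             continue
--         normalized = [str(cell or "").strip() for cell in row]
--         lowered = [cell.lower() for cell in normalized]
--         has_url = any("url" in cell or "link" in cell or "domain" in cell for cell in lowered)
--         has_desc = any("description" in cell or cell in ("desc", "notes", "note", "summary", "about") for cell in lowered)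
--         if has_url and has_desc:
--             return normalized, idx
--         if fallback is None and sum(1 for cell in normalized if cell) >= 2:
--             fallback = (normalized, idx)
--     return fallback if fallback is not None else ([], -1)
-- ===== Notes on version B (the rewrite author's own statement) =====
-- stated objective: alternative
-- what changed: A's two sequential scans (first for a url+description header match, then a separate full rescan for a fallback row with >=2 non-empty cells) are fused into one pass that returns a match immediately and remembers only the first fallback candidate in an accumulator, so the rows are traversed once.
import Mathlib
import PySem

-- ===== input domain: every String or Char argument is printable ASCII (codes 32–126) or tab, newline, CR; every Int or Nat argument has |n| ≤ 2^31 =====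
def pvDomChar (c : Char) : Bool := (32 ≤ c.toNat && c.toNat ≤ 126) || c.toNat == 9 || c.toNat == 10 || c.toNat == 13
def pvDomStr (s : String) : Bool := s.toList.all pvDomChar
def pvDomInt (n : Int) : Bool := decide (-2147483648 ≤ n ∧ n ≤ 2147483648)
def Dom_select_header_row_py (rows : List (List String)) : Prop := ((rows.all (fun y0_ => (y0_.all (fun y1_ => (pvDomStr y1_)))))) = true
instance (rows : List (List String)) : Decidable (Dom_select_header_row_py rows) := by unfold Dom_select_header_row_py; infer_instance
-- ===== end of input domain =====

-- B fuses A's two sequential scans into one pass with a first-fallback accumulator: an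
-- alternative decomposition of the same cost (equal return value, proved below).

-- ===== PORT A =====
-- shared row predicates: both Pythons contain these exact 'any(...)' expressions
def pvHasUrl (lowered : List String) : Bool :=
  lowered.any (fun c => PySem.Str.isIn "url" c || PySem.Str.isIn "link" c || PySem.Str.isIn "domain" c)

def pvHasDesc (lowered : List String) : Bool :=
  lowered.any (fun c => PySem.Str.isIn "description" c ||
    (c == "desc" || c == "notes" || c == "note" || c == "summary" || c == "about"))

-- first loop of A: first non-empty row whose lowered cells have url and desc markers
def pvLoop1 (rows : List (List String)) (idx : Int) : Option (List String × Int) :=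
  match rows with
  | [] => none
  | row :: rest =>
    if row.isEmpty then pvLoop1 rest (idx + 1)
    else
      let normalized := row.map PySem.Str.strip
      let lowered := normalized.map PySem.Str.lower
      if pvHasUrl lowered && pvHasDesc lowered then some (normalized, idx)
      else pvLoop1 rest (idx + 1)

-- second loop of A: first non-empty row with at least 2 non-empty stripped cells
def pvLoop2 (rows : List (List String)) (idx : Int) : Option (List String × Int) :=
  match rows with
  | [] => none
  | row :: rest =>
    if row.isEmpty then pvLoop2 rest (idx + 1)
    else
      let normalized := row.map PySem.Str.strip
      if 2 ≤ normalized.countP (fun c => c ≠ "") then some (normalized, idx)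
      else pvLoop2 rest (idx + 1)

def select_header_row_py (rows : List (List String)) : List String × Int :=
  match pvLoop1 rows 0 with
  | some r => r
  | none =>
    match pvLoop2 rows 0 with
    | some r => r
    | none => ([], -1)

-- ===== PORT B =====
-- single pass: return a url+desc match immediately, else remember the first fallback
def pvAltLoop (rows : List (List String)) (idx : Int) (fb : Option (List String × Int)) :
    List String × Int :=
  match rows with
  | [] => fb.getD ([], -1)
  | row :: rest =>
    if row.isEmpty then pvAltLoop rest (idx + 1) fb
    else
      let normalized := row.map PySem.Str.strip
      let lowered := normalized.map PySem.Str.lower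
      if pvHasUrl lowered && pvHasDesc lowered then (normalized, idx)
      else
        pvAltLoop rest (idx + 1)
          (if fb.isNone && decide (2 ≤ normalized.countP (fun c => c ≠ "")) then
            some (normalized, idx)
          else fb)

def select_header_row_py_alt (rows : List (List String)) : List String × Int :=
  pvAltLoop rows 0 none

-- ===== PRECONDITION & SPEC =====
def Spec_select_header_row_py (rows : List (List String)) (out : List String × Int) : Prop := out = select_header_row_py_alt rows
instance (rows : List (List String)) (out : List String × Int) : Decidable (Spec_select_header_row_py rows out) := by unfold Spec_select_header_row_py; infer_instance

-- ===== CLAIM (what is proved, stated in full; the proofs are below) =====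
def Claim_equal_select_header_row_py : Prop := ∀ (rows : List (List String)), Dom_select_header_row_py rows → Spec_select_header_row_py rows (select_header_row_py rows)

-- ===== LEMMAS AND PROOFS =====

-- the fused loop equals: loop1's result if any, else the recorded fallback, else loop2's result
theorem pvAltLoop_eq (rows : List (List String)) (idx : Int) (fb : Option (List String × Int)) :
    pvAltLoop rows idx fb =
      match pvLoop1 rows idx with
      | some r => r
      | none =>
        match fb with
        | some f => f
        | none =>
          match pvLoop2 rows idx with
          | some r => r
          | none => ([], -1) := by
  induction rows generalizing idx fb with
  | nil => cases fb <;> simp [pvAltLoop, pvLoop1, pvLoop2, Option.getD]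
  | cons row rest ih =>
    simp only [pvAltLoop, pvLoop1, pvLoop2]
    by_cases hemp : row.isEmpty = true
    · rw [if_pos hemp, if_pos hemp, if_pos hemp]
      exact ih _ _
    · rw [if_neg hemp, if_neg hemp, if_neg hemp]
      by_cases hm : (pvHasUrl ((row.map PySem.Str.strip).map PySem.Str.lower) &&
          pvHasDesc ((row.map PySem.Str.strip).map PySem.Str.lower)) = true
      · rw [if_pos hm, if_pos hm]
      · rw [if_neg hm, if_neg hm, ih]
        cases fb with
        | some f => cases pvLoop1 rest (idx + 1) <;> simp
        | none =>
          cases pvLoop1 rest (idx + 1) <;> simp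
          split_ifs <;> rfl

-- ===== VERDICT (by name: the statement is the Claim_ definition above) =====
theorem select_header_row_py_spec : Claim_equal_select_header_row_py := by
  intro rows _
  unfold Spec_select_header_row_py select_header_row_py select_header_row_py_alt
  rw [pvAltLoop_eq]
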